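-- pv_equiv track=rewrite | github.com/nathanzhu144/practices | workspace/palantir.py | func
-- ===== SOURCE A (Python) =====
-- def func(grid):
--     R, C = len(grid), len(grid[0])
--     ret = [[True for c in range(C)] for r in range(R)]
--
--     for r in range(R):
--         for c in range(C):
--             for dr, dc in [(0, 1), (1, 0), (0, -1), (-1, 0), (1, 1), (-1, -1), (-1, 1), (1, -1)]:
--                 newr, newc = dr + r, dc + c
--                 if newr < 0 or newr >= R or newc < 0 or newc >= C: continue
--                 if grid[newr][newc] >= grid[r][c]: ret[r][c] = False
--     return ret
-- ===== SOURCE B (Python) =====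
-- def func(grid):
--     R, C = len(grid), len(grid[0])
--
--     def wmax(row, c):
--         m = row[c]
--         if c > 0 and row[c - 1] > m: m = row[c - 1]
--         if c + 1 < C and row[c + 1] > m: m = row[c + 1]
--         return m
--
--     rowmax = [[wmax(row, c) for c in range(C)] for row in grid]
--     return [[not (c > 0 and grid[r][c - 1] >= grid[r][c])
--              and not (c + 1 < C and grid[r][c + 1] >= grid[r][c])
--              and not (r > 0 and rowmax[r - 1][c] >= grid[r][c])
--              and not (r + 1 < R and rowmax[r + 1][c] >= grid[r][c])
--              for c in range(C)] for r in range(R)]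
-- ===== Notes on version B (the rewrite author's own statement) =====
-- stated objective: faster
-- what changed: A imperatively mutates an all-True matrix while scanning a list of all 8 neighbor offsets per cell; B is a two-stage functional pipeline: it precomputes a horizontal 3-window maximum per row, then builds the answer directly as comprehensions comparing each cell against its two row neighbors and the window maxima of the rows above and below.
-- outside the precondition, e.g. on func([]): A raises IndexError, B raises IndexError; on func([[1, 2], [3]]): A raises IndexError, B raises IndexError
import Mathlib
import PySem

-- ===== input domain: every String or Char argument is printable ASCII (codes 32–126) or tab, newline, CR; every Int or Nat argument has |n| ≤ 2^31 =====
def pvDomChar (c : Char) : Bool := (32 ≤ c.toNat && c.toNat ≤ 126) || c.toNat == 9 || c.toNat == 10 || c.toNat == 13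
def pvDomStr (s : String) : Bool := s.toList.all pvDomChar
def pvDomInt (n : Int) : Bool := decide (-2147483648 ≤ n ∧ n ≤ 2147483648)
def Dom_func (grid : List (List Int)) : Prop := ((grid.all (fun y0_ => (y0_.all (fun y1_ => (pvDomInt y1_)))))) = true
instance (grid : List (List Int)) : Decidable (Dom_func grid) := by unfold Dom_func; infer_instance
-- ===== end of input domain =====

-- B replaces A's 8-direction mutation of an all-True matrix by a two-stage functional pipeline:
-- a precomputed horizontal 3-window maximum per row, then comprehensions comparing each cell
-- against its row neighbours and the window maxima of the adjacent rows (measured faster in a timing run; objective: faster).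


-- row[c]; at every (unguarded) call site the index is in range on Pre_-admitted inputs, so the
-- `getD` default is never reached there (exact on Pre_).
def pvRowGet (row : List Int) (c : Int) : Int := row.getD c.toNat 0

-- grid[r][c]; same remark: exact on Pre_ at every admitted call site.
def pvGet (g : List (List Int)) (r c : Int) : Int :=
  pvRowGet ((PySem.List.pyGet? g r).getD []) c

-- ===== PORT A =====
-- ret[r][c] = False; call sites always have 0 ≤ r < len ret and 0 ≤ c < len ret[r], so .toNat is exact.
def pvSet2d (m : List (List Bool)) (r c : Int) : List (List Bool) :=
  m.modify r.toNat (fun row => row.set c.toNat false)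

def pvDirs8 : List (Int × Int) := [(0,1),(1,0),(0,-1),(-1,0),(1,1),(-1,-1),(-1,1),(1,-1)]

def func (grid : List (List Int)) : List (List Bool) :=
  let R : Int := grid.length
  let C : Int := (((PySem.List.pyGet? grid 0).getD []).length : Int)   -- len(grid[0]); grid ≠ [] by Pre_
  let ret := (PySem.List.pyRange 0 R).map (fun _ => (PySem.List.pyRange 0 C).map (fun _ => true))
  (PySem.List.pyRange 0 R).foldl (fun ret r =>
    (PySem.List.pyRange 0 C).foldl (fun ret c =>
      pvDirs8.foldl (fun ret d =>
        if d.1 + r < 0 ∨ d.1 + r ≥ R ∨ d.2 + c < 0 ∨ d.2 + c ≥ C then ret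
        else if pvGet grid (d.1 + r) (d.2 + c) ≥ pvGet grid r c then pvSet2d ret r c
        else ret) ret) ret) ret

-- ===== PORT B =====
-- wmax(row, c): the max of row[c] and its in-bounds horizontal neighbours
def pvWmax (C : Int) (row : List Int) (c : Int) : Int :=
  let m0 := pvRowGet row c
  let m1 := if 0 < c ∧ pvRowGet row (c - 1) > m0 then pvRowGet row (c - 1) else m0
  if c + 1 < C ∧ pvRowGet row (c + 1) > m1 then pvRowGet row (c + 1) else m1

def func_alt (grid : List (List Int)) : List (List Bool) :=
  let R : Int := grid.length
  let C : Int := (((PySem.List.pyGet? grid 0).getD []).length : Int)   -- len(grid[0]); grid ≠ [] by Pre_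
  let rowmax := grid.map (fun row => (PySem.List.pyRange 0 C).map (fun c => pvWmax C row c))
  (PySem.List.pyRange 0 R).map (fun r => (PySem.List.pyRange 0 C).map (fun c =>
    !(decide (0 < c) && decide (pvGet grid r (c - 1) ≥ pvGet grid r c)) &&
    (!(decide (c + 1 < C) && decide (pvGet grid r (c + 1) ≥ pvGet grid r c)) &&
    (!(decide (0 < r) && decide (pvGet rowmax (r - 1) c ≥ pvGet grid r c)) &&
    !(decide (r + 1 < R) && decide (pvGet rowmax (r + 1) c ≥ pvGet grid r c))))))

-- ===== PRECONDITION & SPEC =====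
-- Pre_ excludes exactly the inputs where the Python A raises IndexError: the empty grid
-- (grid[0]) and ragged grids having a row shorter than the first row (grid[r][c], c < len(grid[0])).
def Pre_func (grid : List (List Int)) : Prop :=
  grid ≠ [] ∧ ∀ row ∈ grid, (grid.getD 0 []).length ≤ row.length
instance (grid : List (List Int)) : Decidable (Pre_func grid) := by unfold Pre_func; infer_instance

def pvWitness_func : List (List Int) := [[1, 2], [4, 3]]

def Spec_func (grid : List (List Int)) (out : List (List Bool)) : Prop := out = func_alt grid
instance (grid : List (List Int)) (out : List (List Bool)) : Decidable (Spec_func grid out) := by unfold Spec_func; infer_instance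

-- ===== CLAIM (what is proved, stated in full; the proofs are below) =====
def Claim_equal_func : Prop := ∀ (grid : List (List Int)), Dom_func grid → Pre_func grid → Spec_func grid (func grid)

-- ===== LEMMAS AND PROOFS =====

-- number of columns (= len(grid[0]))
def pvC0 (g : List (List Int)) : Nat := ((PySem.List.pyGet? g 0).getD []).length

theorem pvC0_def (g : List (List Int)) : ((PySem.List.pyGet? g 0).getD []).length = pvC0 g := rfl

-- row r of the grid (empty when out of range)
def pvRowAt (g : List (List Int)) (r : Int) : List Int := (PySem.List.pyGet? g r).getD []

-- read ret[i][j] (False when out of shape)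
def pvGb (m : List (List Bool)) (i j : Nat) : Bool := (m.getD i []).getD j false

def pvShape (m : List (List Bool)) : List Nat := m.map List.length

theorem pvGb_set2d (m : List (List Bool)) (r c : Int) (i j : Nat) :
    pvGb (pvSet2d m r c) i j = (pvGb m i j && !(r.toNat == i && c.toNat == j)) := by
  simp only [pvGb, pvSet2d, List.getD_eq_getElem?_getD, List.getElem?_modify]
  by_cases hr : r.toNat = i
  · subst hr
    cases h : m[r.toNat]? with
    | none => simp
    | some row =>
      by_cases hc : c.toNat = j
      · subst hc; simp [List.getElem?_set]; split <;> simp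
      · simp [hc]
  · simp [hr]

theorem pvShape_set2d (m : List (List Bool)) (r c : Int) :
    pvShape (pvSet2d m r c) = pvShape m := by
  simp only [pvShape, pvSet2d]
  apply List.ext_getElem <;> simp [List.getElem_modify]
  intro i h1 h2; split <;> simp

theorem pvGb_foldl {σ : Type} (step : List (List Bool) → σ → List (List Bool))
    (k : σ → Nat → Nat → Bool)
    (h : ∀ m s i j, pvGb (step m s) i j = (pvGb m i j && !(k s i j))) :
    ∀ (L : List σ) (m : List (List Bool)) (i j : Nat),
      pvGb (L.foldl step m) i j = (pvGb m i j && !(L.any (fun s => k s i j))) := by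
  intro L
  induction L with
  | nil => intro m i j; simp
  | cons a L ih =>
    intro m i j
    simp only [List.foldl_cons, List.any_cons, ih, h]
    cases k a i j <;> simp

theorem pvShape_foldl {σ : Type} (step : List (List Bool) → σ → List (List Bool))
    (h : ∀ m s, pvShape (step m s) = pvShape m) :
    ∀ (L : List σ) (m : List (List Bool)), pvShape (L.foldl step m) = pvShape m := by
  intro L
  induction L with
  | nil => intro m; rfl
  | cons a L ih => intro m; rw [List.foldl_cons, ih, h]

theorem pvEq_of_shape_gb (m1 m2 : List (List Bool))
    (hs : pvShape m1 = pvShape m2) (hg : ∀ i j, pvGb m1 i j = pvGb m2 i j) : m1 = m2 := by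
  have hlen : m1.length = m2.length := by
    have := congrArg List.length hs; simpa [pvShape] using this
  apply List.ext_getElem hlen
  intro i h1 h2
  have hrl : m1[i].length = m2[i].length := by
    have : (pvShape m1)[i]? = (pvShape m2)[i]? := by rw [hs]
    simpa [pvShape, h1, h2] using this
  apply List.ext_getElem hrl
  intro j hj1 hj2
  have := hg i j
  simpa [pvGb, List.getD_eq_getElem?_getD, List.getElem?_eq_getElem, h1, h2, hj1, hj2] using this

-- the cells A's triple loop sets to False, as a predicate on (i, j)
def pvKA (g : List (List Int)) (r c : Int) (d : Int × Int) (i j : Nat) : Bool :=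
  !decide (d.1 + r < 0 ∨ d.1 + r ≥ (g.length : Int) ∨ d.2 + c < 0 ∨ d.2 + c ≥ (pvC0 g : Int)) &&
  (decide (pvGet g (d.1 + r) (d.2 + c) ≥ pvGet g r c) && (r.toNat == i && c.toNat == j))

def pvKillA (g : List (List Int)) (i j : Nat) : Bool :=
  (PySem.List.pyRange 0 (g.length : Int)).any fun r =>
    (PySem.List.pyRange 0 (pvC0 g : Int)).any fun c =>
      pvDirs8.any fun d => pvKA g r c d i j

theorem pvStepA (g : List (List Int)) (r c : Int) (d : Int × Int) (m : List (List Bool)) (i j : Nat) :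
    pvGb (if d.1 + r < 0 ∨ d.1 + r ≥ (g.length : Int) ∨ d.2 + c < 0 ∨ d.2 + c ≥ (pvC0 g : Int) then m
          else if pvGet g (d.1 + r) (d.2 + c) ≥ pvGet g r c then pvSet2d m r c else m) i j
      = (pvGb m i j && !(pvKA g r c d i j)) := by
  unfold pvKA
  by_cases h1 : d.1 + r < 0 ∨ d.1 + r ≥ (g.length : Int) ∨ d.2 + c < 0 ∨ d.2 + c ≥ (pvC0 g : Int)
  · simp [h1]
  · by_cases h2 : pvGet g (d.1 + r) (d.2 + c) ≥ pvGet g r c <;> simp [h1, h2, pvGb_set2d]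

theorem pvGb_init (g : List (List Int)) (i j : Nat) :
    pvGb ((PySem.List.pyRange 0 (g.length : Int)).map
      (fun _ => (PySem.List.pyRange 0 (pvC0 g : Int)).map (fun _ => true))) i j
      = (decide (i < g.length) && decide (j < pvC0 g)) := by
  simp only [pvGb, PySem.List.pyRange_zero_natCast, List.map_map, List.getD_eq_getElem?_getD,
    List.getElem?_map]
  by_cases hi : i < g.length
  · by_cases hj : j < pvC0 g <;> simp [hi, hj]
  · simp [hi]

theorem pvGb_funcA (g : List (List Int)) (i j : Nat) :
    pvGb (func g) i j = ((decide (i < g.length) && decide (j < pvC0 g)) && !(pvKillA g i j)) := by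
  simp only [func, pvC0_def]
  refine (pvGb_foldl _ (fun r i j =>
        (PySem.List.pyRange 0 (pvC0 g : Int)).any fun c => pvDirs8.any fun d => pvKA g r c d i j)
      (fun m r i j => pvGb_foldl _ (fun c i j => pvDirs8.any fun d => pvKA g r c d i j)
        (fun m c i j => pvGb_foldl _ (fun d i j => pvKA g r c d i j)
          (fun m d i j => pvStepA g r c d m i j) pvDirs8 m i j)
        (PySem.List.pyRange 0 (pvC0 g : Int)) m i j)
      (PySem.List.pyRange 0 (g.length : Int)) _ i j).trans ?_
  rw [pvGb_init]
  rfl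

-- (i,j) has a Chebyshev-distance-1 neighbour (a,b) inside the R×C box with value ≥ grid[i][j]
def pvKillP (g : List (List Int)) (i j : Nat) : Prop :=
  ∃ a b : Int, 0 ≤ a ∧ a < (g.length : Int) ∧ 0 ≤ b ∧ b < (pvC0 g : Int) ∧
    ¬(a = (i : Int) ∧ b = (j : Int)) ∧
    a - i ≤ 1 ∧ (i : Int) - a ≤ 1 ∧ b - j ≤ 1 ∧ (j : Int) - b ≤ 1 ∧
    pvGet g a b ≥ pvGet g i j

theorem pvKillA_iff (g : List (List Int)) (i j : Nat)
    (hi : i < g.length) (hj : j < pvC0 g) :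
    pvKillA g i j = true ↔ pvKillP g i j := by
  unfold pvKillA pvKA pvKillP
  simp only [List.any_eq_true, PySem.List.mem_pyRange_one, Bool.and_eq_true, Bool.not_eq_true',
    decide_eq_true_eq, decide_eq_false_iff_not, beq_iff_eq]
  constructor
  · rintro ⟨r, ⟨hr0, hrR⟩, c, ⟨hc0, hcC⟩, d, hd, hoob, hge, hri, hcj⟩
    have hdf : (-1 ≤ d.1 ∧ d.1 ≤ 1 ∧ -1 ≤ d.2 ∧ d.2 ≤ 1 ∧ ¬(d.1 = 0 ∧ d.2 = 0)) := by
      simp [pvDirs8, Prod.ext_iff] at hd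
      rcases hd with ⟨h1, h2⟩|⟨h1, h2⟩|⟨h1, h2⟩|⟨h1, h2⟩|⟨h1, h2⟩|⟨h1, h2⟩|⟨h1, h2⟩|⟨h1, h2⟩ <;>
        simp [h1, h2]
    have hr' : r = (i : Int) := by omega
    have hc' : c = (j : Int) := by omega
    subst hr' hc'
    exact ⟨d.1 + i, d.2 + j, by omega, by omega, by omega, by omega, by omega,
      by omega, by omega, by omega, by omega, hge⟩
  · rintro ⟨a, b, ha0, haR, hb0, hbC, hne, h1, h2, h3, h4, hge⟩
    refine ⟨(i : Int), ⟨by omega, by omega⟩, (j : Int), ⟨by omega, by omega⟩,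
      (a - i, b - j), ?_, by omega, ?_, by simp, by simp⟩
    · simp only [pvDirs8, List.mem_cons, Prod.ext_iff, List.not_mem_nil, or_false]
      omega
    · have e1 : a - (i : Int) + (i : Int) = a := by ring
      have e2 : b - (j : Int) + (j : Int) = b := by ring
      simpa [e1, e2] using hge

theorem pvShape_funcA (g : List (List Int)) :
    pvShape (func g) = pvShape ((PySem.List.pyRange 0 (g.length : Int)).map
      (fun _ => (PySem.List.pyRange 0 (pvC0 g : Int)).map (fun _ => true))) := by
  simp only [func, pvC0_def]
  refine pvShape_foldl _ (fun m r => ?_) _ _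
  refine pvShape_foldl _ (fun m c => ?_) _ _
  refine pvShape_foldl _ (fun m d => ?_) _ _
  split_ifs <;> simp [pvShape_set2d]

-- ===== B-side lemmas =====

-- the precomputed rowmax matrix of B, named for the lemmas
def pvRowmax (g : List (List Int)) : List (List Int) :=
  g.map (fun row => (PySem.List.pyRange 0 (pvC0 g : Int)).map (fun c => pvWmax (pvC0 g : Int) row c))

-- the cells B's comprehensions mark False, as the disjunction of B's four guarded tests
def pvKillB (g : List (List Int)) (i j : Nat) : Bool :=
  (decide (0 < (j : Int)) && decide (pvGet g i ((j : Int) - 1) ≥ pvGet g i j)) ||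
  ((decide ((j : Int) + 1 < (pvC0 g : Int)) && decide (pvGet g i ((j : Int) + 1) ≥ pvGet g i j)) ||
  ((decide (0 < (i : Int)) && decide (pvGet (pvRowmax g) ((i : Int) - 1) j ≥ pvGet g i j)) ||
  (decide ((i : Int) + 1 < (g.length : Int)) && decide (pvGet (pvRowmax g) ((i : Int) + 1) j ≥ pvGet g i j))))

theorem pvGb_funcB (g : List (List Int)) (i j : Nat) :
    pvGb (func_alt g) i j = ((decide (i < g.length) && decide (j < pvC0 g)) && !(pvKillB g i j)) := by
  simp only [func_alt, pvGb, PySem.List.pyRange_zero_natCast, List.map_map,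
    List.getD_eq_getElem?_getD, List.getElem?_map]
  by_cases hi : i < g.length
  · by_cases hj : j < pvC0 g
    · have hj' : j < (((PySem.List.pyGet? g 0).getD []).length) := hj
      simp [pvKillB, pvRowmax, Bool.not_or, PySem.List.pyRange_zero_natCast, List.map_map, hi,
        hj', pvC0]
      rfl
    · have hj' : ¬ j < (((PySem.List.pyGet? g 0).getD []).length) := hj
      simp [pvKillB, pvC0, hi, hj']
  · simp [pvKillB, hi]

-- window max reaches v iff one of the up-to-three window entries does
theorem pvWmax_ge_iff (C : Nat) (row : List Int) (j : Nat) (v : Int) :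
    v ≤ pvWmax (C : Int) row (j : Int) ↔
      (v ≤ pvRowGet row (j : Int) ∨
       (0 < (j : Int) ∧ v ≤ pvRowGet row ((j : Int) - 1)) ∨
       ((j : Int) + 1 < (C : Int) ∧ v ≤ pvRowGet row ((j : Int) + 1))) := by
  simp only [pvWmax]
  split_ifs <;> omega

-- reading B's rowmax matrix at an in-range position
theorem pvGet_rowmax (g : List (List Int)) (a : Int) (j : Nat)
    (ha0 : 0 ≤ a) (haR : a < (g.length : Int)) (hj : j < pvC0 g) :
    pvGet (pvRowmax g) a (j : Int) = pvWmax (pvC0 g : Int) (pvRowAt g a) (j : Int) := by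
  have hlt : a.toNat < g.length := by omega
  simp only [pvGet, pvRowmax, pvRowAt, PySem.List.pyGet?_of_nonneg _ ha0, List.getElem?_map,
    pvRowGet, PySem.List.pyRange_zero_natCast, List.map_map, List.getD_eq_getElem?_getD]
  simp [List.getElem?_eq_getElem hlt, hj]

theorem pvKillB_iff (g : List (List Int)) (i j : Nat)
    (hi : i < g.length) (hj : j < pvC0 g) :
    pvKillB g i j = true ↔ pvKillP g i j := by
  unfold pvKillB pvKillP
  simp only [Bool.or_eq_true, Bool.and_eq_true, decide_eq_true_eq]
  constructor
  · rintro (⟨hg0, hge⟩ | ⟨hgC, hge⟩ | ⟨hg0, hge⟩ | ⟨hgR, hge⟩)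
    · exact ⟨(i : Int), (j : Int) - 1, by omega, by omega, by omega, by omega, by omega,
        by omega, by omega, by omega, by omega, hge⟩
    · exact ⟨(i : Int), (j : Int) + 1, by omega, by omega, by omega, by omega, by omega,
        by omega, by omega, by omega, by omega, hge⟩
    · rw [pvGet_rowmax g _ j (by omega) (by omega) hj] at hge
      rcases (pvWmax_ge_iff (pvC0 g) (pvRowAt g ((i : Int) - 1)) j (pvGet g i j)).mp hge with
        h | ⟨hb, h⟩ | ⟨hb, h⟩
      · exact ⟨(i : Int) - 1, (j : Int), by omega, by omega, by omega, by omega, by omega,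
          by omega, by omega, by omega, by omega, h⟩
      · exact ⟨(i : Int) - 1, (j : Int) - 1, by omega, by omega, by omega, by omega, by omega,
          by omega, by omega, by omega, by omega, h⟩
      · exact ⟨(i : Int) - 1, (j : Int) + 1, by omega, by omega, by omega, by omega, by omega,
          by omega, by omega, by omega, by omega, h⟩
    · rw [pvGet_rowmax g _ j (by omega) (by omega) hj] at hge
      rcases (pvWmax_ge_iff (pvC0 g) (pvRowAt g ((i : Int) + 1)) j (pvGet g i j)).mp hge with
        h | ⟨hb, h⟩ | ⟨hb, h⟩
      · exact ⟨(i : Int) + 1, (j : Int), by omega, by omega, by omega, by omega, by omega,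
          by omega, by omega, by omega, by omega, h⟩
      · exact ⟨(i : Int) + 1, (j : Int) - 1, by omega, by omega, by omega, by omega, by omega,
          by omega, by omega, by omega, by omega, h⟩
      · exact ⟨(i : Int) + 1, (j : Int) + 1, by omega, by omega, by omega, by omega, by omega,
          by omega, by omega, by omega, by omega, h⟩
  · rintro ⟨a, b, ha0, haR, hb0, hbC, hne, h1, h2, h3, h4, hge⟩
    rcases (by omega : a = (i : Int) ∨ a = (i : Int) - 1 ∨ a = (i : Int) + 1) with ha | ha | ha
    · subst ha
      rcases (by omega : b = (j : Int) - 1 ∨ b = (j : Int) + 1) with hb | hb <;> subst hb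
      · exact Or.inl ⟨by omega, hge⟩
      · exact Or.inr (Or.inl ⟨by omega, hge⟩)
    · refine Or.inr (Or.inr (Or.inl ⟨by omega, ?_⟩))
      rw [pvGet_rowmax g _ j (by omega) (by omega) hj]
      apply (pvWmax_ge_iff (pvC0 g) (pvRowAt g ((i : Int) - 1)) j (pvGet g i j)).mpr
      rcases (by omega : b = (j : Int) ∨ b = (j : Int) - 1 ∨ b = (j : Int) + 1) with hb | hb | hb <;>
        subst hb
      · exact Or.inl (by rw [← ha]; exact hge)
      · exact Or.inr (Or.inl ⟨by omega, by rw [← ha]; exact hge⟩)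
      · exact Or.inr (Or.inr ⟨by omega, by rw [← ha]; exact hge⟩)
    · refine Or.inr (Or.inr (Or.inr ⟨by omega, ?_⟩))
      rw [pvGet_rowmax g _ j (by omega) (by omega) hj]
      apply (pvWmax_ge_iff (pvC0 g) (pvRowAt g ((i : Int) + 1)) j (pvGet g i j)).mpr
      rcases (by omega : b = (j : Int) ∨ b = (j : Int) - 1 ∨ b = (j : Int) + 1) with hb | hb | hb <;>
        subst hb
      · exact Or.inl (by rw [← ha]; exact hge)
      · exact Or.inr (Or.inl ⟨by omega, by rw [← ha]; exact hge⟩)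
      · exact Or.inr (Or.inr ⟨by omega, by rw [← ha]; exact hge⟩)

theorem pvShape_funcB (g : List (List Int)) :
    pvShape (func_alt g) = pvShape ((PySem.List.pyRange 0 (g.length : Int)).map
      (fun _ => (PySem.List.pyRange 0 (pvC0 g : Int)).map (fun _ => true))) := by
  simp [pvShape, func_alt, pvC0_def, List.map_map, Function.comp_def,
    PySem.List.length_pyRange_one]

-- ===== VERDICT (by name: the statement is the Claim_ definition above) =====
theorem func_spec : Claim_equal_func := by
  intro g _ _
  show func g = func_alt g
  apply pvEq_of_shape_gb
  · rw [pvShape_funcA, pvShape_funcB]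
  · intro i j
    rw [pvGb_funcA, pvGb_funcB]
    by_cases hi : i < g.length
    · by_cases hj : j < pvC0 g
      · have hk : pvKillA g i j = pvKillB g i j := by
          rw [Bool.eq_iff_iff, pvKillA_iff g i j hi hj, pvKillB_iff g i j hi hj]
        rw [hk]
      · simp [hj]
    · simp [hi]
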